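-- pv_equiv track=rewrite | github.com/CollinHeist/TitleCardMaker | config/DatabaseInterface.py | __determine_best_image
-- ===== SOURCE A (Python) =====
-- def __determine_best_image(images: list) -> dict:
--     """
--     Determines the best image, returning it's contents from within
--     the database return JSON.
--
--     :param      images: The results from the database. Each entry
--                         is a new image to be considered.
--
--     :returns:   The "best" image for title card creation. This is
--                 determined using the images' aspect ratios, and
--                 dimensions. Priority given to largest image.
--     """
--
--     # Only one image, bypass this function
--     if len(images) == 1:
--         return images[0]
--
--     # Pick the best image based on image dimensions, and then vote average
--     best_image = {'index': 0, 'pixels': 0, 'score': 0}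
--     for index, image in enumerate(images):
--         pixels = int(image['height']) * int(image['width'])
--         score = int(image['vote_average'])
--
--         # Priority 1 is image size, priority 2 is vote average/score
--         if pixels > best_image['pixels']:
--             best_image = {'index': index, 'pixels': pixels, 'score': score}
--         elif pixels == best_image['pixels']:
--             if score > best_image['score']:
--                 best_image = {'index': index, 'pixels': pixels, 'score': score}
--
--     return images[best_image['index']]
-- ===== SOURCE B (Python) =====
-- def __determine_best_image(images: list) -> dict:
--     # Only one image, bypass (no keys are inspected in that case)
--     if len(images) == 1:
--         return images[0]
--
--     # Stable descending sort by (pixel count, vote average); the head is the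
--     # first-occurring image with the lexicographically largest key.
--     def key(image):
--         return (int(image['height']) * int(image['width']), int(image['vote_average']))
--
--     return sorted(images, key=key, reverse=True)[0]
-- ===== Notes on version B (the rewrite author's own statement) =====
-- stated objective: alternative
-- what changed: Replaces A's hand-rolled best-so-far loop over enumerate with an index/pixels/score record (seeded with a (0,0) sentinel) by one stable descending sort on the key (pixels, vote_average) whose head is taken; Python's stable sort keeps first occurrences on ties, matching A's strict-comparison tie-breaking.
-- intended difference: On lists of >=2 images whose (pixels, vote_average) keys are all <= (0,0) while some later image's key beats the first one's, A returns images[0] because its sentinel best=(0,0) is never beaten, while B returns the first image with the genuinely largest key - the intended best image. — e.g. on __determine_best_image([[("height","-1"),("width","1"),("vote_average","0")], [("height","0"),("width","0"),("vote_average","0")]]): A returns [("height","-1"),("width","1"),("vote_average","0")], B returns [("height","0"),("width","0"),("vote_average","0")]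
-- outside the precondition, e.g. on __determine_best_image([]): A raises IndexError, B raises IndexError
import Mathlib
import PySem

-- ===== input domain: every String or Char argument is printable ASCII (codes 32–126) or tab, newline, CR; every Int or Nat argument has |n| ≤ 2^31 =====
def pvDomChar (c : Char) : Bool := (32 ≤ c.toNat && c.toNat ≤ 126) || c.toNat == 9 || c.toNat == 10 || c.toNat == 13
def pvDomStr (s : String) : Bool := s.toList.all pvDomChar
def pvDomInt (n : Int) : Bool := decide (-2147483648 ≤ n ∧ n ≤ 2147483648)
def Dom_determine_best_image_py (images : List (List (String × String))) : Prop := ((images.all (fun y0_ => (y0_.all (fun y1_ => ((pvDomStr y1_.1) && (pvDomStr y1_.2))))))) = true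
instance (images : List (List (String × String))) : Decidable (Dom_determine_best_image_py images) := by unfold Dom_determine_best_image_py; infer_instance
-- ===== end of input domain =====

-- B replaces A's hand-rolled best-so-far loop (with its (0,0) sentinel) by one stable
-- descending sort on the key (pixels, vote_average) and takes the head; alternative
-- decomposition, not claimed faster.

-- int(image[k]) for both ports: first-match dict lookup, then Python int();
-- the .getD defaults are only reachable outside Pre_ (where the Python raises).
def pvInt (img : List (String × String)) (k : String) : Int :=
  (PySem.Int.ofStr? (((PySem.Dict.mk img).get? k).getD "")).getD 0

-- ===== PORT A =====
-- the loop body of A: state is (index, pixels, score)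
def pvLoopA (best : Int × Int × Int) (p : Int × List (String × String)) : Int × Int × Int :=
  let pixels := pvInt p.2 "height" * pvInt p.2 "width"
  let score := pvInt p.2 "vote_average"
  if pixels > best.2.1 then (p.1, pixels, score)
  else if pixels = best.2.1 then
    (if score > best.2.2 then (p.1, pixels, score) else best)
  else best

def determine_best_image_py (images : List (List (String × String))) : List (String × String) :=
  if images.length = 1 then images.headD []
  else
    let best := (PySem.List.enumerate images 0).foldl pvLoopA (0, 0, 0)
    (PySem.List.pyGet? images best.1).getD []

-- ===== PORT B =====
def determine_best_image_py_alt (images : List (List (String × String))) : List (String × String) :=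
  if images.length = 1 then images.headD []
  else
    (PySem.List.sorted2 images
      (fun image => pvInt image "height" * pvInt image "width")
      (fun image => pvInt image "vote_average") true).headD []

-- ===== PRECONDITION & SPEC =====
-- all three values look up and parse as ints (else Python raises KeyError/ValueError)
def pvParses (img : List (String × String)) : Bool :=
  ((((PySem.Dict.mk img).get? "height").bind PySem.Int.ofStr?).isSome) &&
  ((((PySem.Dict.mk img).get? "width").bind PySem.Int.ofStr?).isSome) &&
  ((((PySem.Dict.mk img).get? "vote_average").bind PySem.Int.ofStr?).isSome)

-- A raises IndexError on [] and KeyError/ValueError when (len ≠ 1) some image lacks an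
-- int-parseable height/width/vote_average; exactly those inputs are excluded.
def Pre_determine_best_image_py (images : List (List (String × String))) : Prop :=
  images ≠ [] ∧ (images.length = 1 ∨ images.all pvParses = true)
instance (images : List (List (String × String))) : Decidable (Pre_determine_best_image_py images) := by unfold Pre_determine_best_image_py; infer_instance

def pvWitness_determine_best_image_py : (List (List (String × String))) :=
  [[("height","2"),("width","3"),("vote_average","5")],
   [("height","1"),("width","1"),("vote_average","0")]]

-- the (pixels, score) key of an image, and Python's lexicographic tuple order on it
def pvKey (img : List (String × String)) : Int × Int :=
  (pvInt img "height" * pvInt img "width", pvInt img "vote_average")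
def pvKeyLt (p q : Int × Int) : Bool := p.1 < q.1 || (p.1 == q.1 && p.2 < q.2)
def pvKeyLe (p q : Int × Int) : Bool := p.1 < q.1 || (p.1 == q.1 && p.2 ≤ q.2)

-- On lists of ≥ 2 images whose keys are all ≤ (0,0) while some later image's key beats the
-- first one's, A returns images[0] (its sentinel best=(0,0) is never beaten), while B returns
-- the first image with the genuinely largest (pixels, vote_average) key — the intended best.
def D_determine_best_image_py (images : List (List (String × String))) : Prop :=
  2 ≤ images.length ∧
  (∀ img ∈ images, pvKeyLe (pvKey img) (0, 0) = true) ∧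
  (∃ x ∈ images.tail, pvKeyLt (pvKey (images.headD [])) (pvKey x) = true)
instance (images : List (List (String × String))) : Decidable (D_determine_best_image_py images) := by unfold D_determine_best_image_py; infer_instance

def Spec_determine_best_image_py (images : List (List (String × String))) (out : List (String × String)) : Prop := ¬ D_determine_best_image_py images → out = determine_best_image_py_alt images
instance (images : List (List (String × String))) (out : List (String × String)) : Decidable (Spec_determine_best_image_py images out) := by unfold Spec_determine_best_image_py; infer_instance

def pvDiffWitness_determine_best_image_py : (List (List (String × String))) :=
  [[("height","-1"),("width","1"),("vote_average","0")],
   [("height","0"),("width","0"),("vote_average","0")]]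
def pvDiffWitnessOut_determine_best_image_py : (List (String × String)) × (List (String × String)) :=
  ([("height","-1"),("width","1"),("vote_average","0")],
   [("height","0"),("width","0"),("vote_average","0")])

-- ===== CLAIM (what is proved, stated in full; the proofs are below) =====
def Claim_unchanged_determine_best_image_py : Prop := ∀ (images : List (List (String × String))), Dom_determine_best_image_py images → Pre_determine_best_image_py images → Spec_determine_best_image_py images (determine_best_image_py images)
def Claim_changed_determine_best_image_py : Prop := Dom_determine_best_image_py (pvDiffWitness_determine_best_image_py) ∧ Pre_determine_best_image_py (pvDiffWitness_determine_best_image_py) ∧ D_determine_best_image_py (pvDiffWitness_determine_best_image_py) ∧ determine_best_image_py (pvDiffWitness_determine_best_image_py) = pvDiffWitnessOut_determine_best_image_py.1 ∧ determine_best_image_py_alt (pvDiffWitness_determine_best_image_py) = pvDiffWitnessOut_determine_best_image_py.2 ∧ pvDiffWitnessOut_determine_best_image_py.1 ≠ pvDiffWitnessOut_determine_best_image_py.2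
def Claim_exact_determine_best_image_py : Prop := ∀ (images : List (List (String × String))), Dom_determine_best_image_py images → Pre_determine_best_image_py images → D_determine_best_image_py images → determine_best_image_py images ≠ determine_best_image_py_alt images

-- ===== LEMMAS AND PROOFS =====

-- B's running step: keep the first element with the lexicographically larger key
def pvStepB (b x : List (String × String)) : List (String × String) :=
  if pvKeyLt (pvKey b) (pvKey x) then x else b

-- order facts
lemma pvKeyLe_iff_not_lt (p q : Int × Int) : pvKeyLe p q = !pvKeyLt q p := by
  rw [Bool.eq_iff_iff]; simp [pvKeyLe, pvKeyLt]; omega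

lemma pvKeyLe_refl (p : Int × Int) : pvKeyLe p p = true := by simp [pvKeyLe]

lemma pvKeyLt_trans {p q r : Int × Int} (h1 : pvKeyLt p q = true) (h2 : pvKeyLt q r = true) :
    pvKeyLt p r = true := by
  simp only [pvKeyLt, Bool.or_eq_true, Bool.and_eq_true, decide_eq_true_iff, beq_iff_eq] at *
  omega

lemma pvKeyLe_lt_trans {p q r : Int × Int} (h1 : pvKeyLe p q = true) (h2 : pvKeyLt q r = true) :
    pvKeyLt p r = true := by
  simp only [pvKeyLe, pvKeyLt, Bool.or_eq_true, Bool.and_eq_true, decide_eq_true_iff,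
    beq_iff_eq] at *
  omega

lemma pvKeyLt_le_trans {p q r : Int × Int} (h1 : pvKeyLt p q = true) (h2 : pvKeyLe q r = true) :
    pvKeyLt p r = true := by
  simp only [pvKeyLe, pvKeyLt, Bool.or_eq_true, Bool.and_eq_true, decide_eq_true_iff,
    beq_iff_eq] at *
  omega

lemma pvKeyLt_ne {p q : Int × Int} (h : pvKeyLt p q = true) : p ≠ q := by
  simp only [pvKeyLt, Bool.or_eq_true, Bool.and_eq_true, decide_eq_true_iff, beq_iff_eq] at h
  rintro rfl; omega

-- A's loop body, rephrased through the key order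
lemma pvLoopA_eq (b : Int × Int × Int) (p : Int × List (String × String)) :
    pvLoopA b p = if pvKeyLt b.2 (pvKey p.2) = true then (p.1, pvKey p.2) else b := by
  rcases b with ⟨bi, bp, bs⟩
  simp only [pvLoopA, pvKeyLt, pvKey]
  split_ifs <;> simp_all <;> omega

-- head of an insertBy-fold is the running "first maximum" of the before-relation
lemma headD_foldl_insertBy {α : Type} (bef : α → α → Bool) (d : α) :
    ∀ (l : List α) (m : α) (acc : List α),
      ((l.foldl (fun ac x => PySem.List.insertBy bef x ac) (m :: acc)).headD d)
        = l.foldl (fun b x => if bef x b then x else b) m := by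
  intro l
  induction l with
  | nil => intro m acc; rfl
  | cons x r ih =>
      intro m acc
      rw [List.foldl_cons]
      have hins : PySem.List.insertBy bef x (m :: acc)
          = if bef x m then x :: m :: acc else m :: PySem.List.insertBy bef x acc := by
        simp [PySem.List.insertBy]
      rw [hins]
      by_cases h : bef x m = true
      · rw [if_pos h, ih x (m :: acc)]
        simp only [List.foldl_cons, if_pos h]
      · rw [if_neg h, ih m (PySem.List.insertBy bef x acc)]
        simp only [List.foldl_cons, if_neg h]

-- B's sorted2 fold step agrees with pvStepB
lemma foldl_step_eq (t : List (List (String × String))) (a : List (String × String)) :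
    t.foldl (fun (b x : List (String × String)) =>
      if (decide (pvInt b "height" * pvInt b "width" < pvInt x "height" * pvInt x "width") ||
          (!decide (pvInt x "height" * pvInt x "width" < pvInt b "height" * pvInt b "width") &&
            decide (pvInt b "vote_average" < pvInt x "vote_average"))) then x else b) a
      = t.foldl pvStepB a := by
  have hfun : (fun (b x : List (String × String)) =>
      if (decide (pvInt b "height" * pvInt b "width" < pvInt x "height" * pvInt x "width") ||
          (!decide (pvInt x "height" * pvInt x "width" < pvInt b "height" * pvInt b "width") &&
            decide (pvInt b "vote_average" < pvInt x "vote_average"))) then x else b)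
      = pvStepB := by
    funext b x
    have hcond : (decide (pvInt b "height" * pvInt b "width"
          < pvInt x "height" * pvInt x "width") ||
        (!decide (pvInt x "height" * pvInt x "width" < pvInt b "height" * pvInt b "width") &&
          decide (pvInt b "vote_average" < pvInt x "vote_average")))
        = pvKeyLt (pvKey b) (pvKey x) := by
      rw [Bool.eq_iff_iff]; simp [pvKeyLt, pvKey]; omega
    rw [hcond]; rfl
  rw [hfun]

-- the head of B's descending stable sort, on a nonempty list
lemma sorted2_rev_headD (a : List (String × String)) (t : List (List (String × String))) :
    (PySem.List.sorted2 (a :: t)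
        (fun image => pvInt image "height" * pvInt image "width")
        (fun image => pvInt image "vote_average") true).headD []
      = t.foldl pvStepB a := by
  have h0 : ∀ bef : List (String × String) → List (String × String) → Bool,
      PySem.List.insertBy bef a ([] : List (List (String × String))) = [a] := by
    intro bef; simp [PySem.List.insertBy]
  simp only [PySem.List.sorted2, if_true, List.foldl_cons]
  rw [h0, headD_foldl_insertBy]
  exact foldl_step_eq t a

lemma enumerate_cons (x : List (String × String)) (r : List (List (String × String)))
    (j : Int) :
    PySem.List.enumerate (x :: r) j = (j, x) :: PySem.List.enumerate r (j + 1) := rfl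

-- mode-2 sync: once A's best records a real image, A and B update in lockstep
lemma sync2 (images : List (List (String × String))) :
    ∀ (l : List (List (String × String))) (j bi : Int) (m : List (String × String)),
      (∀ (i : Nat), i < l.length → PySem.List.pyGet? images (j + i) = some l[i]!) →
      PySem.List.pyGet? images bi = some m →
      ∃ bi' m'',
        (PySem.List.enumerate l j).foldl pvLoopA (bi, pvKey m) = (bi', pvKey m'')
        ∧ PySem.List.pyGet? images bi' = some m''
        ∧ l.foldl pvStepB m = m'' := by
  intro l
  induction l with
  | nil => intro j bi m _ hm; exact ⟨bi, m, rfl, hm, rfl⟩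
  | cons x r ih =>
      intro j bi m hidx hm
      have hx : PySem.List.pyGet? images j = some x := by
        have := hidx 0 (by simp); simpa using this
      have hidx' : ∀ (i : Nat), i < r.length →
          PySem.List.pyGet? images (j + 1 + i) = some r[i]! := by
        intro i hi
        have := hidx (i + 1) (by simpa using Nat.succ_lt_succ hi)
        have harith : j + ((i : Int) + 1) = j + 1 + i := by ring
        have hget : (x :: r)[i + 1]! = r[i]! := by
          simp [List.getElem!_eq_getElem?_getD]
        rw [← harith, ← hget]; simpa using this
      rw [enumerate_cons, List.foldl_cons, List.foldl_cons, pvLoopA_eq]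
      dsimp only [pvStepB]
      by_cases h : pvKeyLt (pvKey m) (pvKey x) = true
      · rw [if_pos h, if_pos h]
        exact ih (j + 1) j x hidx' hx
      · rw [if_neg h, if_neg h]
        exact ih (j + 1) bi m hidx' hm

-- mode-1 sync: while A's sentinel (0,0) is unbeaten it keeps index 0; B meanwhile tracks
-- the true running maximum
lemma sync1 (images : List (List (String × String))) (a : List (String × String))
    (t : List (List (String × String))) :
    ∀ (l : List (List (String × String))) (j : Int) (m : List (String × String)),
      (∀ (i : Nat), i < l.length → PySem.List.pyGet? images (j + i) = some l[i]!) →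
      (∀ x ∈ l, x ∈ t) →
      pvKeyLe (pvKey m) (0, 0) = true →
      (m = a ∨ (m ∈ t ∧ pvKeyLt (pvKey a) (pvKey m) = true)) →
      (((PySem.List.enumerate l j).foldl pvLoopA ((0 : Int), ((0 : Int), (0 : Int)))
            = ((0 : Int), ((0 : Int), (0 : Int)))
          ∧ (∀ x ∈ l, pvKeyLe (pvKey x) (0, 0) = true)
          ∧ (l.foldl pvStepB m = a
             ∨ (l.foldl pvStepB m ∈ t ∧ pvKeyLt (pvKey a) (pvKey (l.foldl pvStepB m)) = true)))
        ∨ (∃ bi' m'',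
            (PySem.List.enumerate l j).foldl pvLoopA ((0 : Int), ((0 : Int), (0 : Int)))
              = (bi', pvKey m'')
            ∧ PySem.List.pyGet? images bi' = some m''
            ∧ l.foldl pvStepB m = m'')) := by
  intro l
  induction l with
  | nil => intro j m _ _ _ hdis; exact Or.inl ⟨rfl, by simp, hdis⟩
  | cons x r ih =>
      intro j m hidx hsub hle hdis
      have hx : PySem.List.pyGet? images j = some x := by
        have := hidx 0 (by simp); simpa using this
      have hidx' : ∀ (i : Nat), i < r.length →
          PySem.List.pyGet? images (j + 1 + i) = some r[i]! := by
        intro i hi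
        have := hidx (i + 1) (by simpa using Nat.succ_lt_succ hi)
        have harith : j + ((i : Int) + 1) = j + 1 + i := by ring
        have hget : (x :: r)[i + 1]! = r[i]! := by
          simp [List.getElem!_eq_getElem?_getD]
        rw [← harith, ← hget]; simpa using this
      have hxt : x ∈ t := hsub x (by simp)
      have hsub' : ∀ y ∈ r, y ∈ t := fun y hy => hsub y (by simp [hy])
      rw [enumerate_cons, List.foldl_cons, List.foldl_cons, pvLoopA_eq]
      dsimp only [pvStepB]
      by_cases h0 : pvKeyLt ((0 : Int), (0 : Int)) (pvKey x) = true
      · -- A's sentinel is beaten by x: both switch to x, mode 2 from here on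
        have hBx : pvKeyLt (pvKey m) (pvKey x) = true := pvKeyLe_lt_trans hle h0
        rw [if_pos h0, if_pos hBx]
        exact Or.inr (sync2 images r (j + 1) j x hidx' hx)
      · -- sentinel unbeaten: A keeps (0,0,0); B may move to x
        have hxle : pvKeyLe (pvKey x) (0, 0) = true := by
          rw [pvKeyLe_iff_not_lt]; simp [h0]
        rw [if_neg h0]
        by_cases hB : pvKeyLt (pvKey m) (pvKey x) = true
        · rw [if_pos hB]
          have hdis' : x = a ∨ (x ∈ t ∧ pvKeyLt (pvKey a) (pvKey x) = true) := by
            rcases hdis with rfl | ⟨_, hlt⟩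
            · exact Or.inr ⟨hxt, hB⟩
            · exact Or.inr ⟨hxt, pvKeyLt_trans hlt hB⟩
          rcases ih (j + 1) x hidx' hsub' hxle hdis' with ⟨h1, h2, h3⟩ | h
          · exact Or.inl ⟨h1, fun y hy => by
              rcases List.mem_cons.mp hy with rfl | hy
              · exact hxle
              · exact h2 y hy, h3⟩
          · exact Or.inr h
        · rw [if_neg hB]
          rcases ih (j + 1) m hidx' hsub' hle hdis with ⟨h1, h2, h3⟩ | h
          · exact Or.inl ⟨h1, fun y hy => by
              rcases List.mem_cons.mp hy with rfl | hy
              · exact hxle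
              · exact h2 y hy, h3⟩
          · exact Or.inr h

-- indexing facts for images = a :: t
lemma pyGet_cons_idx (a : List (String × String)) (t : List (List (String × String))) :
    ∀ (i : Nat), i < t.length →
      PySem.List.pyGet? (a :: t) ((1 : Int) + i) = some t[i]! := by
  intro i hi
  have h1 : ((1 : Int) + i) = ((i + 1 : Nat) : Int) := by push_cast; ring
  rw [h1, PySem.List.pyGet?_natCast]
  simp [List.getElem?_cons_succ, List.getElem!_eq_getElem?_getD, List.getElem?_eq_getElem hi]

lemma pyGet_cons_zero (a : List (String × String)) (t : List (List (String × String))) :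
    PySem.List.pyGet? (a :: t) (0 : Int) = some a := by
  rw [show (0 : Int) = ((0 : Nat) : Int) from rfl, PySem.List.pyGet?_natCast]
  simp

-- if every key is ≤ (0,0), A's loop never updates
lemma staysA (l : List (List (String × String))) :
    ∀ (j : Int), (∀ x ∈ l, pvKeyLe (pvKey x) (0, 0) = true) →
      (PySem.List.enumerate l j).foldl pvLoopA ((0 : Int), ((0 : Int), (0 : Int)))
        = ((0 : Int), ((0 : Int), (0 : Int))) := by
  induction l with
  | nil => intro j _; rfl
  | cons x r ih =>
      intro j hall
      have hx : ¬ pvKeyLt ((0 : Int), (0 : Int)) (pvKey x) = true := by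
        intro h
        have := hall x (by simp)
        rw [pvKeyLe_iff_not_lt] at this; simp [h] at this
      rw [enumerate_cons, List.foldl_cons, pvLoopA_eq]
      dsimp only
      rw [if_neg hx]
      exact ih (j + 1) (fun y hy => hall y (by simp [hy]))

-- B's fold returns an element whose key dominates the start and every element scanned
lemma foldB_max (l : List (List (String × String))) :
    ∀ (m : List (String × String)),
      pvKeyLe (pvKey m) (pvKey (l.foldl pvStepB m)) = true
      ∧ ∀ x ∈ l, pvKeyLe (pvKey x) (pvKey (l.foldl pvStepB m)) = true := by
  induction l with
  | nil => intro m; exact ⟨pvKeyLe_refl _, by simp⟩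
  | cons x r ih =>
      intro m
      rw [List.foldl_cons]
      simp only [pvStepB]
      by_cases h : pvKeyLt (pvKey m) (pvKey x) = true
      · rw [if_pos h]
        obtain ⟨h1, h2⟩ := ih x
        refine ⟨pvKeyLt_le_trans h h1 |> fun hlt => ?_, fun y hy => ?_⟩
        · simp only [pvKeyLe, pvKeyLt, Bool.or_eq_true, Bool.and_eq_true,
            decide_eq_true_iff, beq_iff_eq] at hlt ⊢
          omega
        · rcases List.mem_cons.mp hy with rfl | hy
          · exact h1
          · exact h2 y hy
      · rw [if_neg h]
        obtain ⟨h1, h2⟩ := ih m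
        refine ⟨h1, fun y hy => ?_⟩
        rcases List.mem_cons.mp hy with rfl | hy
        · have hxm : pvKeyLe (pvKey y) (pvKey m) = true := by
            rw [pvKeyLe_iff_not_lt]; simp [h]
          simp only [pvKeyLe, Bool.or_eq_true, Bool.and_eq_true, decide_eq_true_iff,
            beq_iff_eq] at hxm h1 ⊢
          omega
        · exact h2 y hy

-- ===== VERDICT (by name: the statement is the Claim_ definition above) =====
theorem determine_best_image_py_spec : Claim_unchanged_determine_best_image_py := by
  intro images hdom hpre hnd
  by_cases hlen : images.length = 1
  · simp [determine_best_image_py, determine_best_image_py_alt, hlen]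
  · rcases images with _ | ⟨a, t⟩
    · exact absurd rfl hpre.1
    · simp only [determine_best_image_py, determine_best_image_py_alt, if_neg hlen]
      rw [sorted2_rev_headD, enumerate_cons, List.foldl_cons, pvLoopA_eq]
      dsimp only
      simp only [zero_add]
      have hidx := pyGet_cons_idx a t
      by_cases h0 : pvKeyLt ((0 : Int), (0 : Int)) (pvKey a) = true
      · rw [if_pos h0]
        obtain ⟨bi', m'', hr, hget, hfold⟩ :=
          sync2 (a :: t) t 1 0 a hidx (pyGet_cons_zero a t)
        rw [hr, hfold]
        simp [hget]
      · rw [if_neg h0]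
        have hle : pvKeyLe (pvKey a) (0, 0) = true := by
          rw [pvKeyLe_iff_not_lt]; simp [h0]
        rcases sync1 (a :: t) a t t 1 a hidx (fun x hx => hx) hle (Or.inl rfl) with
          ⟨h1, h2, h3⟩ | ⟨bi', m'', hr, hget, hfold⟩
        · rw [h1]
          rcases h3 with h3 | ⟨hmem, hlt⟩
          · rw [h3]
            dsimp only
            simp
          · exfalso
            apply hnd
            refine ⟨by simp only [List.length_cons] at hlen ⊢; omega, fun img himg => ?_, t.foldl pvStepB a, by simpa using hmem,
              by simpa using hlt⟩
            rcases List.mem_cons.mp himg with rfl | himg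
            · exact hle
            · exact h2 img himg
        · rw [hr, hfold]
          simp [hget]

theorem determine_best_image_py_changed : Claim_changed_determine_best_image_py := by
  unfold Claim_changed_determine_best_image_py; decide

theorem determine_best_image_py_tight : Claim_exact_determine_best_image_py := by
  intro images hdom hpre hd
  obtain ⟨hlen2, hall, x, hx, hlt⟩ := hd
  rcases images with _ | ⟨a, t⟩
  · simp at hlen2
  · have hlen : ¬ (a :: t).length = 1 := by simp only [List.length_cons] at hlen2 ⊢; omega
    simp only [determine_best_image_py, determine_best_image_py_alt, if_neg hlen]
    rw [sorted2_rev_headD, enumerate_cons, List.foldl_cons, pvLoopA_eq]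
    dsimp only
    simp only [zero_add]
    have hle : pvKeyLe (pvKey a) (0, 0) = true := hall a (by simp)
    have h0 : ¬ pvKeyLt ((0 : Int), (0 : Int)) (pvKey a) = true := by
      rw [pvKeyLe_iff_not_lt] at hle; intro h; simp [h] at hle
    rw [if_neg h0, staysA t 1 (fun y hy => hall y (by simp [hy]))]
    rw [show PySem.List.pyGet? (a :: t) (((0 : Int), ((0 : Int), (0 : Int))) :
        Int × Int × Int).1 = some a from pyGet_cons_zero a t]
    simp only [Option.getD_some]
    obtain ⟨-, h2⟩ := foldB_max t a
    have hxt : x ∈ t := by simpa using hx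
    have ha : pvKeyLt (pvKey a) (pvKey (t.foldl pvStepB a)) = true :=
      pvKeyLt_le_trans (by simpa using hlt) (h2 x hxt)
    intro heq
    exact pvKeyLt_ne ha (congrArg pvKey heq)
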